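-- pv_equiv track=rewrite | github.com/AllaVinner/Python-Packages-Tutorials | biopython/DNA-Algorithms/exam-4.py | create_kmer_relations
-- ===== SOURCE A (Python) =====
-- def create_kmer_relations(reads, k):
--     rels = dict()
--     for read_i, read in enumerate(reads):
--         for i in range(len(read)-k+1):
--             kmer = read[i:i+k]
--             if kmer in rels:
--                 rels[kmer].add(read_i)
--             else:
--                 rels[kmer] = set([read_i])
--     return rels
-- ===== SOURCE B (Python) =====
-- def create_kmer_relations(reads, k):
--     pairs = [(read[i:i + k], read_i)
--              for read_i, read in enumerate(reads)
--              for i in range(len(read) - k + 1)]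
--     keys = list(dict.fromkeys(kmer for kmer, _ in pairs))
--     return {kmer: {ri for km, ri in pairs if km == kmer} for kmer in keys}
-- ===== Notes on version B (the rewrite author's own statement) =====
-- stated objective: alternative
-- what changed: Replaces the one-pass dict-of-sets accumulation by first materialising a flat (kmer, read_index) pair table, deduplicating the kmer stream to fix key order, and then grouping the indices of each key by filtering the table.
import Mathlib
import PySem

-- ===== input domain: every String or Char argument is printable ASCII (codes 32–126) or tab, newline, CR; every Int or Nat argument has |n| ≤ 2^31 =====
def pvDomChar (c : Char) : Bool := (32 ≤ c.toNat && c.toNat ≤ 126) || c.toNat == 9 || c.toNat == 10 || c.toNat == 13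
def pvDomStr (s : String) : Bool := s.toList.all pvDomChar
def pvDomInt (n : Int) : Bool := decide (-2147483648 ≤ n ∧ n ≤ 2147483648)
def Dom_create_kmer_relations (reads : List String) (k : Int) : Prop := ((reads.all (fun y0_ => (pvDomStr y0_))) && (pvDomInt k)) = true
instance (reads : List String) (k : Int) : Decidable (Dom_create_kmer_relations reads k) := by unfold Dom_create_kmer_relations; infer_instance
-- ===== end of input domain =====

-- B replaces A's one-pass dict-of-sets accumulation by a flat (kmer, read_index) pair
-- table that is deduplicated for key order and filtered per key (alternative algorithm).


-- ===== PORT A =====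
def create_kmer_relations (reads : List String) (k : Int) : List (String × List Int) :=
  ((PySem.List.enumerate reads 0).foldl (fun rels p =>
      (PySem.List.pyRange 0 (PySem.Str.len p.2 - k + 1) 1).foldl (fun rels i =>
        let kmer := PySem.Str.slice p.2 (some i) (some (i + k))
        match rels.get? kmer with
        | some s => rels.insert kmer (PySem.Set.add s p.1)
        | none   => rels.insert kmer (PySem.Set.ofList [p.1])) rels)
    PySem.Dict.empty).items

-- ===== PORT B =====
def kmerPairs (reads : List String) (k : Int) : List (String × Int) :=
  (PySem.List.enumerate reads 0).flatMap (fun p =>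
    (PySem.List.pyRange 0 (PySem.Str.len p.2 - k + 1) 1).map
      (fun i => (PySem.Str.slice p.2 (some i) (some (i + k)), p.1)))

def create_kmer_relations_alt (reads : List String) (k : Int) : List (String × List Int) :=
  let pairs := kmerPairs reads k
  (PySem.List.dedup (pairs.map (·.1))).map
    (fun kmer => (kmer, PySem.Set.ofList ((pairs.filter (fun q => q.1 == kmer)).map (·.2))))

-- ===== PRECONDITION & SPEC =====
def Spec_create_kmer_relations (reads : List String) (k : Int) (out : List (String × List Int)) : Prop := out = create_kmer_relations_alt reads k
instance (reads : List String) (k : Int) (out : List (String × List Int)) : Decidable (Spec_create_kmer_relations reads k out) := by unfold Spec_create_kmer_relations; infer_instance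

-- ===== CLAIM (what is proved, stated in full; the proofs are below) =====
def Claim_equal_create_kmer_relations : Prop := ∀ (reads : List String) (k : Int), Dom_create_kmer_relations reads k → Spec_create_kmer_relations reads k (create_kmer_relations reads k)

-- ===== LEMMAS AND PROOFS =====

-- A's branch on `kmer in rels` is exactly Python's d[k] = f(d.get(k, set())) pattern, i.e. Dict.modify.
lemma step_eq_modify (d : PySem.Dict String (List Int)) (km : String) (ri : Int) :
    (match d.get? km with
     | some s => d.insert km (PySem.Set.add s ri)
     | none   => d.insert km (PySem.Set.ofList [ri]))
    = d.modify km PySem.Set.empty (fun s => PySem.Set.add s ri) := by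
  cases h : d.get? km with
  | some s =>
      simp [PySem.Dict.modify, PySem.Dict.getD_eq_get?_getD, h]
  | none =>
      simp [PySem.Dict.modify, PySem.Dict.getD_eq_get?_getD, h,
        PySem.Set.add, PySem.Set.ofList, PySem.Set.empty, PySem.Set.contains]

-- Folding the modify-step over a pair list: the value at km collects the matching indices.
lemma getD_foldl_modify_add (ps : List (String × Int)) (d : PySem.Dict String (List Int)) (km : String) :
    (ps.foldl (fun d p => d.modify p.1 PySem.Set.empty (fun s => PySem.Set.add s p.2)) d).getD km PySem.Set.empty
    = PySem.Set.update (d.getD km PySem.Set.empty) ((ps.filter (fun q => q.1 == km)).map (·.2)) := by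
  induction ps generalizing d with
  | nil => simp [PySem.Set.update]
  | cons p rest ih =>
      simp only [List.foldl_cons, ih, List.filter_cons]
      by_cases hp : p.1 = km
      · simp [hp, PySem.Set.update_cons]
      · simp [hp, PySem.Dict.getD_modify, Ne.symm hp]

-- The whole accumulation loop, characterised as B computes it.
lemma foldl_step_items (ps : List (String × Int)) :
    (ps.foldl (fun d p => d.modify p.1 PySem.Set.empty (fun s => PySem.Set.add s p.2))
        (PySem.Dict.empty : PySem.Dict String (List Int))).items
    = (PySem.List.dedup (ps.map (·.1))).map
        (fun km => (km, PySem.Set.ofList ((ps.filter (fun q => q.1 == km)).map (·.2)))) := by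
  have hnd : (ps.foldl (fun d p => d.modify p.1 PySem.Set.empty (fun s => PySem.Set.add s p.2))
      (PySem.Dict.empty : PySem.Dict String (List Int))).keys.Nodup := by
    apply PySem.Dict.nodup_keys_foldl_modify_key ps (fun p => p.1) PySem.Set.empty
      (fun d p s => PySem.Set.add s p.2)
    simp [PySem.Dict.keys_empty]
  rw [PySem.Dict.items_eq_map_keys _ hnd PySem.Set.empty]
  rw [PySem.Dict.keys_foldl_modify_key ps (fun p => p.1) PySem.Set.empty
      (fun d p s => PySem.Set.add s p.2)]
  simp only [PySem.Dict.keys_empty, PySem.List.dedup_eq_ofList]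
  apply List.map_congr_left
  intro km _
  rw [getD_foldl_modify_add]
  simp [PySem.Dict.getD_empty, PySem.Set.update_nil_left]

theorem create_kmer_relations_eq (reads : List String) (k : Int) :
    create_kmer_relations reads k = create_kmer_relations_alt reads k := by
  unfold create_kmer_relations create_kmer_relations_alt kmerPairs
  have hA : ∀ (rels : PySem.Dict String (List Int)) (p : Int × String),
      (PySem.List.pyRange 0 (PySem.Str.len p.2 - k + 1) 1).foldl (fun rels i =>
        let kmer := PySem.Str.slice p.2 (some i) (some (i + k))
        match rels.get? kmer with
        | some s => rels.insert kmer (PySem.Set.add s p.1)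
        | none   => rels.insert kmer (PySem.Set.ofList [p.1])) rels
      = ((PySem.List.pyRange 0 (PySem.Str.len p.2 - k + 1) 1).map
          (fun i => (PySem.Str.slice p.2 (some i) (some (i + k)), p.1))).foldl
          (fun d q => d.modify q.1 PySem.Set.empty (fun s => PySem.Set.add s q.2)) rels := by
    intro rels p
    rw [List.foldl_map]
    exact PySem.List.foldl_congr_mem _ _ _ _
      (fun d i _ => step_eq_modify d (PySem.Str.slice p.2 (some i) (some (i + k))) p.1)
  calc
    ((PySem.List.enumerate reads 0).foldl (fun rels p =>
        (PySem.List.pyRange 0 (PySem.Str.len p.2 - k + 1) 1).foldl (fun rels i =>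
          let kmer := PySem.Str.slice p.2 (some i) (some (i + k))
          match rels.get? kmer with
          | some s => rels.insert kmer (PySem.Set.add s p.1)
          | none   => rels.insert kmer (PySem.Set.ofList [p.1])) rels)
      PySem.Dict.empty).items
      = (((PySem.List.enumerate reads 0).flatMap (fun p =>
            (PySem.List.pyRange 0 (PySem.Str.len p.2 - k + 1) 1).map
              (fun i => (PySem.Str.slice p.2 (some i) (some (i + k)), p.1)))).foldl
          (fun d q => d.modify q.1 PySem.Set.empty (fun s => PySem.Set.add s q.2))
          PySem.Dict.empty).items := by
        rw [List.foldl_flatMap]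
        congr 1
        exact PySem.List.foldl_congr_mem _ _ _ _ (fun d p _ => hA d p)
    _ = _ := by rw [foldl_step_items]

-- ===== VERDICT (by name: the statement is the Claim_ definition above) =====
theorem create_kmer_relations_spec : Claim_equal_create_kmer_relations := by
  intro reads k _
  exact create_kmer_relations_eq reads k
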